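-- pv_equiv track=rewrite | github.com/daniel-reich/ubiquitous-fiesta | Ygt4LGupxDAqXNrhS_16.py | spotlight_map
-- ===== SOURCE A (Python) =====
-- def spotlight_map(grid):
--     if not grid:
--         return grid
--     filler = [[0] * (len(grid[0]) + 2)]
--     grid2 = filler + [[0] + i + [0] for i in grid] + filler
--     c = [-1,0,1]
--     ans = []
--     for j in range(1,len(grid2)-1):
--         aux = []
--         for i in range(1,len(grid2[0])-1):
--             temp = (grid2[j+k][i+l] for l in c for k in c)
--             aux.append(sum(temp))
--         ans.append(aux)
--     return ans
-- ===== SOURCE B (Python) =====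
-- def spotlight_map(grid):
--     if not grid:
--         return grid
--     n, m = len(grid), len(grid[0])
--
--     def cell(j, i):
--         return grid[j][i] if 0 <= j < n and 0 <= i < m else 0
--
--     horiz = [[cell(j, i - 1) + cell(j, i) + cell(j, i + 1) for i in range(m)]
--              for j in range(n)]
--
--     def hrow(j, i):
--         return horiz[j][i] if 0 <= j < n else 0
--
--     return [[hrow(j - 1, i) + hrow(j, i) + hrow(j + 1, i) for i in range(m)]
--             for j in range(n)]
-- ===== Notes on version B (the rewrite author's own statement) =====
-- stated objective: alternative
-- what changed: Replaces the zero-padded grid copy and per-cell 3x3 gather (9 additions per cell) with a separable filter: one horizontal pass of clamped 3-sums per row, then one vertical pass summing three row results (6 additions per cell, no padded copy).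
-- outside the precondition, e.g. on spotlight_map([[1, 2], [3, 4, 5]]): A returns [[10, 15], [10, 15]], B returns [[10, 10], [10, 10]]
import Mathlib
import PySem

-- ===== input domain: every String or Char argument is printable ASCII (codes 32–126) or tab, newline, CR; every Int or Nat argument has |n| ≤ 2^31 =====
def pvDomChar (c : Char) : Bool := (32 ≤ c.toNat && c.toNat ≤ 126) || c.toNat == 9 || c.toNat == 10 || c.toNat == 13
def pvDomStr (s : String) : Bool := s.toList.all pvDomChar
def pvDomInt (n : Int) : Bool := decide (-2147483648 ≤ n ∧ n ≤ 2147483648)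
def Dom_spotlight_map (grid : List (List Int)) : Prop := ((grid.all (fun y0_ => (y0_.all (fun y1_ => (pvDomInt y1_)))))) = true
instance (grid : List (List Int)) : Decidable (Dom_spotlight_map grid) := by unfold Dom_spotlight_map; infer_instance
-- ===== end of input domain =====

-- B replaces A's zero-padded grid copy + per-cell 3x3 gather by a separable filter
-- (a horizontal clamped 3-sum pass, then a vertical 3-sum pass): fewer additions per cell, no padded copy (a timing run measured B modestly faster).

-- ===== PORT A =====
-- grid2[j+k][i+l] is ported with pyGetD; under Pre_ every such index is in range, so the default is never the result
def spotlight_map (grid : List (List Int)) : List (List Int) :=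
  if grid = [] then grid
  else
    let filler : List (List Int) := [List.replicate ((grid.headD []).length + 2) 0]
    let grid2 := filler ++ grid.map (fun i => 0 :: i ++ [0]) ++ filler
    let c : List Int := [-1, 0, 1]
    (PySem.List.pyRange 1 ((grid2.length : Int) - 1) 1).foldl (fun ans j =>
      ans ++ [(PySem.List.pyRange 1 (((grid2.headD []).length : Int) - 1) 1).foldl (fun aux i =>
        aux ++ [(c.flatMap (fun l => c.map (fun k =>
          PySem.List.pyGetD (PySem.List.pyGetD grid2 (j + k) []) (i + l) 0))).sum]) []]) []

-- ===== PORT B =====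
-- cell(j, i) of Source B: grid[j][i] when (j, i) is inside the n x m grid, else 0
def pvCell (grid : List (List Int)) (n m j i : Int) : Int :=
  if 0 ≤ j ∧ j < n ∧ 0 ≤ i ∧ i < m then
    PySem.List.pyGetD (PySem.List.pyGetD grid j []) i 0
  else 0

-- hrow(j, i) of Source B: horiz[j][i] when the row index is in bounds, else 0
def pvHrow (horiz : List (List Int)) (n j i : Int) : Int :=
  if 0 ≤ j ∧ j < n then PySem.List.pyGetD (PySem.List.pyGetD horiz j []) i 0 else 0

def spotlight_map_alt (grid : List (List Int)) : List (List Int) :=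
  if grid = [] then grid
  else
    let n : Int := grid.length
    let m : Int := (grid.headD []).length
    let horiz := (PySem.List.pyRange 0 n 1).map (fun j =>
      (PySem.List.pyRange 0 m 1).map (fun i =>
        pvCell grid n m j (i - 1) + pvCell grid n m j i + pvCell grid n m j (i + 1)))
    (PySem.List.pyRange 0 n 1).map (fun j =>
      (PySem.List.pyRange 0 m 1).map (fun i =>
        pvHrow horiz n (j - 1) i + pvHrow horiz n j i + pvHrow horiz n (j + 1) i))

-- ===== PRECONDITION & SPEC =====
-- Pre_ excludes ragged grids with a nonempty first row: there A raises IndexError when some row is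
-- shorter than the first, and when a row is longer A silently adds cells outside the 3x3 window
-- to the border sums (an artefact of padding every row to the first row's width).
def Pre_spotlight_map (grid : List (List Int)) : Prop :=
  (grid.headD []).length = 0 ∨ ∀ r ∈ grid, r.length = (grid.headD []).length
instance (grid : List (List Int)) : Decidable (Pre_spotlight_map grid) := by
  unfold Pre_spotlight_map; infer_instance

def pvWitness_spotlight_map : List (List Int) := [[1, 2], [3, 4]]

def Spec_spotlight_map (grid : List (List Int)) (out : List (List Int)) : Prop := out = spotlight_map_alt grid
instance (grid : List (List Int)) (out : List (List Int)) : Decidable (Spec_spotlight_map grid out) := by unfold Spec_spotlight_map; infer_instance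

-- ===== CLAIM (what is proved, stated in full; the proofs are below) =====
def Claim_equal_spotlight_map : Prop := ∀ (grid : List (List Int)), Dom_spotlight_map grid → Pre_spotlight_map grid → Spec_spotlight_map grid (spotlight_map grid)

-- ===== LEMMAS AND PROOFS =====

-- any lookup into a replicate-of-zeros with default 0 yields 0
lemma pvRep_getD (k : Nat) (b : Int) :
    PySem.List.pyGetD (List.replicate k (0 : Int)) b 0 = 0 := by
  by_cases h : PySem.Raise.InRange (List.replicate k (0 : Int)).length b
  · exact List.eq_of_mem_replicate (PySem.List.pyGetD_mem _ 0 h)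
  · exact PySem.List.pyGetD_of_none _ _ _ ((PySem.List.pyGet?_eq_none_iff _ _).mpr h)

-- access into one zero-padded row, shifted by one
lemma pvRow (r : List Int) (M : Nat) (hr : r.length = M) (b : Int)
    (hb0 : 0 ≤ b) (hb : b ≤ (M : Int) + 1) :
    PySem.List.pyGetD (0 :: r ++ [0]) b 0
      = (if 0 ≤ b - 1 ∧ b - 1 < (M : Int) then PySem.List.pyGetD r (b - 1) 0 else 0) := by
  have hlen : (0 :: r ++ [0]).length = M + 2 := by simp [hr]
  rw [PySem.List.pyGetD_eq_getElem _ _ hb0 (by rw [hlen]; push_cast; omega)]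
  by_cases h0 : b = 0
  · simp only [show b.toNat = 0 from by omega]
    rw [List.getElem_append_left (by simp), if_neg (by omega : ¬(0 ≤ b - 1 ∧ b - 1 < (M : Int)))]
    simp
  · obtain ⟨v, hv⟩ : ∃ v, b.toNat = v + 1 := ⟨b.toNat - 1, by omega⟩
    by_cases hM1 : b = (M : Int) + 1
    · rw [List.getElem_append_right (by simp; omega)]
      simp only [show b.toNat - (0 :: r).length = 0 from by simp [hr]; omega]
      rw [if_neg (by omega), List.getElem_singleton]
    · have hvM : v < M := by omega
      rw [List.getElem_append_left (by simp [hr]; omega)]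
      simp only [hv, List.getElem_cons_succ]
      rw [if_pos (by omega)]
      rw [PySem.List.pyGetD_eq_getElem _ _ (by omega) (by rw [hr]; omega)]
      simp only [show (b - 1).toNat = v from by omega]

-- access into A's padded grid equals B's clamped cell access, shifted by one in both axes
lemma pvAcc (grid : List (List Int))
    (hpre : ∀ r ∈ grid, r.length = (grid.headD []).length) (a b : Int)
    (ha0 : 0 ≤ a) (ha : a ≤ (grid.length : Int) + 1)
    (hb0 : 0 ≤ b) (hb : b ≤ ((grid.headD []).length : Int) + 1) :
    PySem.List.pyGetD (PySem.List.pyGetD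
        ([List.replicate ((grid.headD []).length + 2) (0 : Int)] ++
          grid.map (fun r => 0 :: r ++ [0]) ++
          [List.replicate ((grid.headD []).length + 2) (0 : Int)]) a []) b 0
      = pvCell grid (grid.length : Int) ((grid.headD []).length : Int) (a - 1) (b - 1) := by
  set M := (grid.headD []).length with hM
  set N := grid.length with hN
  have hlen : (([List.replicate (M + 2) (0 : Int)] ++ grid.map (fun r => 0 :: r ++ [0]) ++
      [List.replicate (M + 2) (0 : Int)])).length = N + 2 := by simp; omega
  rw [PySem.List.pyGetD_eq_getElem _ _ ha0 (by rw [hlen]; push_cast; omega)]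
  by_cases h0 : a = 0
  · rw [List.getElem_append_left (by simp; omega)]
    rw [List.getElem_append_left (by simp; omega)]
    simp only [show a.toNat = 0 from by omega, List.getElem_singleton]
    rw [pvRep_getD, pvCell, if_neg (by omega)]
  · by_cases hN1 : a = (N : Int) + 1
    · rw [List.getElem_append_right (by simp; omega)]
      simp only [List.getElem_singleton]
      rw [pvRep_getD, pvCell, if_neg (by omega)]
    · obtain ⟨s, hs⟩ : ∃ s, a.toNat = s + 1 := ⟨a.toNat - 1, by omega⟩
      have hsN : s < N := by omega
      rw [List.getElem_append_left (by simp; omega)]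
      rw [List.getElem_append_right (by simp; omega)]
      simp only [List.length_singleton, List.getElem_map,
        show a.toNat - 1 = s from by omega]
      have hr : (grid[s]).length = M := hpre _ (List.getElem_mem _)
      rw [pvRow _ M hr b hb0 hb]
      rw [pvCell]
      by_cases hin : 0 ≤ b - 1 ∧ b - 1 < (M : Int)
      · rw [if_pos hin, if_pos (by constructor; omega; constructor; omega; exact hin)]
        rw [PySem.List.pyGetD_eq_getElem grid _ (by omega) (by rw [← hN]; omega)]
        simp only [show (a - 1).toNat = s from by omega]
      · rw [if_neg hin, if_neg (by intro h; exact hin ⟨h.2.2.1, h.2.2.2⟩)]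

-- one pvHrow access of B unfolds to the horizontal 3-sum of clamped cells
lemma pvHrow_eq (grid : List (List Int)) (j i : Int)
    (hi0 : 0 ≤ i) (hi : i < ((grid.headD []).length : Int)) :
    pvHrow ((PySem.List.pyRange 0 (grid.length : Int) 1).map (fun j =>
      (PySem.List.pyRange 0 ((grid.headD []).length : Int) 1).map (fun i =>
        pvCell grid (grid.length : Int) ((grid.headD []).length : Int) j (i - 1) +
        pvCell grid (grid.length : Int) ((grid.headD []).length : Int) j i +
        pvCell grid (grid.length : Int) ((grid.headD []).length : Int) j (i + 1))))
      (grid.length : Int) j i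
      = pvCell grid (grid.length : Int) ((grid.headD []).length : Int) j (i - 1) +
        pvCell grid (grid.length : Int) ((grid.headD []).length : Int) j i +
        pvCell grid (grid.length : Int) ((grid.headD []).length : Int) j (i + 1) := by
  rw [pvHrow]
  by_cases hj : 0 ≤ j ∧ j < (grid.length : Int)
  · rw [if_pos hj, PySem.List.pyGetD_map_pyRange_of_nonneg _ _ _ _ hj.1 hj.2,
      PySem.List.pyGetD_map_pyRange_of_nonneg _ _ _ _ hi0 hi]
  · rw [if_neg hj, pvCell, pvCell, pvCell,
      if_neg (fun h => hj ⟨h.1, h.2.1⟩), if_neg (fun h => hj ⟨h.1, h.2.1⟩),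
      if_neg (fun h => hj ⟨h.1, h.2.1⟩)]
    simp

theorem pv_main (grid : List (List Int)) (hpre : Pre_spotlight_map grid) :
    spotlight_map grid = spotlight_map_alt grid := by
  by_cases hg : grid = []
  · simp [spotlight_map, spotlight_map_alt, hg]
  rw [spotlight_map, spotlight_map_alt, if_neg hg, if_neg hg]
  simp only [PySem.List.foldl_append_singleton_eq_map, List.nil_append]
  have hb1 : ((((([List.replicate ((grid.headD []).length + 2) (0:Int)] ++
      List.map (fun i => 0 :: i ++ [0]) grid ++
      [List.replicate ((grid.headD []).length + 2) (0:Int)]).headD []).length : Int)) - 1)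
      = ((grid.headD []).length : Int) + 1 := by
    simp; omega
  have hb2 : (((([List.replicate ((grid.headD []).length + 2) (0:Int)] ++
      List.map (fun i => 0 :: i ++ [0]) grid ++
      [List.replicate ((grid.headD []).length + 2) (0:Int)]).length : Int)) - 1)
      = (grid.length : Int) + 1 := by
    simp
  rw [hb1, hb2]
  apply List.ext_getElem
  · simp only [List.length_map, PySem.List.length_pyRange_one]; omega
  intro jj hj1 hj2
  simp only [List.length_map, PySem.List.length_pyRange_one] at hj1 hj2
  simp only [List.getElem_map, PySem.List.getElem_pyRange_one]
  apply List.ext_getElem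
  · simp only [List.length_map, PySem.List.length_pyRange_one]; omega
  intro ii hi1 hi2
  simp only [List.length_map, PySem.List.length_pyRange_one] at hi1 hi2
  simp only [List.getElem_map, PySem.List.getElem_pyRange_one]
  have hjN : jj < grid.length := by omega
  have hiM : ii < (grid.headD []).length := by omega
  have hrect : ∀ r ∈ grid, r.length = (grid.headD []).length := by
    rcases hpre with h0 | h
    · omega
    · exact h
  simp only [List.flatMap_cons, List.flatMap_nil, List.map_cons, List.map_nil,
    List.sum_append, List.sum_cons, List.sum_nil, List.append_nil, add_zero]
  rw [pvAcc grid hrect (1+(jj:Int)+-1) (1+(ii:Int)+-1) (by omega) (by omega) (by omega) (by omega),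
      pvAcc grid hrect (1+(jj:Int)) (1+(ii:Int)+-1) (by omega) (by omega) (by omega) (by omega),
      pvAcc grid hrect (1+(jj:Int)+1) (1+(ii:Int)+-1) (by omega) (by omega) (by omega) (by omega),
      pvAcc grid hrect (1+(jj:Int)+-1) (1+(ii:Int)) (by omega) (by omega) (by omega) (by omega),
      pvAcc grid hrect (1+(jj:Int)) (1+(ii:Int)) (by omega) (by omega) (by omega) (by omega),
      pvAcc grid hrect (1+(jj:Int)+1) (1+(ii:Int)) (by omega) (by omega) (by omega) (by omega),
      pvAcc grid hrect (1+(jj:Int)+-1) (1+(ii:Int)+1) (by omega) (by omega) (by omega) (by omega),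
      pvAcc grid hrect (1+(jj:Int)) (1+(ii:Int)+1) (by omega) (by omega) (by omega) (by omega),
      pvAcc grid hrect (1+(jj:Int)+1) (1+(ii:Int)+1) (by omega) (by omega) (by omega) (by omega)]
  rw [pvHrow_eq grid (0+(jj:Int)-1) (0+(ii:Int)) (by omega) (by omega),
      pvHrow_eq grid (0+(jj:Int)) (0+(ii:Int)) (by omega) (by omega),
      pvHrow_eq grid (0+(jj:Int)+1) (0+(ii:Int)) (by omega) (by omega)]
  simp only [show (1+(jj:Int)+-1-1) = 0+(jj:Int)-1 from by ring,
    show (1+(jj:Int)-1) = 0+(jj:Int) from by ring,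
    show (1+(jj:Int)+1-1) = 0+(jj:Int)+1 from by ring,
    show (1+(ii:Int)+-1-1) = 0+(ii:Int)-1 from by ring,
    show (1+(ii:Int)-1) = 0+(ii:Int) from by ring,
    show (1+(ii:Int)+1-1) = 0+(ii:Int)+1 from by ring]
  ring

-- ===== VERDICT (by name: the statement is the Claim_ definition above) =====
theorem spotlight_map_spec : Claim_equal_spotlight_map := by
  intro grid _ hpre
  unfold Spec_spotlight_map
  exact pv_main grid hpre
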